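-- pv_equiv track=rewrite | github.com/Shift34/Secret | Lab3.py | printNextSeq
-- ===== SOURCE A (Python) =====
-- def printNextSeq(sourceSeq, L, lfsr, count):
--     registr = [0] * L
--     gamma = []
--     for i in range(L):
--         registr[i] = sourceSeq[L - i - 1]
--     for i in range(count):
--         next_s = 0
--         for j in range(L):
--             next_s ^= gf_mult(lfsr[j + 1], registr[j])
--
--         for j in range(L - 1, 0, -1):
--             registr[j] = registr[j - 1]
--         registr[0] = next_s
--         gamma.append(next_s)
--     return gamma
--
-- def gf_mult(x, y, p=0x11d):
--     res = 0
--     while y > 0: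
--         if y & 1:
--             res ^= x
--         x <<= 1
--         if x & 0x100:
--             x ^= p
--         y >>= 1
--     return res
-- ===== SOURCE B (Python) =====
-- def gf_mult(x, y, p=0x11d):
--     res = 0
--     while y > 0:
--         if y & 1:
--             res ^= x
--         x <<= 1
--         if x & 0x100:
--             x ^= p
--         y >>= 1
--     return res
--
--
-- def printNextSeq(sourceSeq, L, lfsr, count):
--     # Growing-history formulation: instead of shifting a fixed register each
--     # step, append each new symbol to W and read the feedback taps by index
--     # arithmetic into the history.
--     W = [sourceSeq[k] for k in range(L)]
--     for i in range(count):
--         s = 0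
--         for j in range(L):
--             s ^= gf_mult(lfsr[j + 1], W[L - 1 + i - j])
--         W.append(s)
--     return W[L:]
-- ===== Notes on version B (the rewrite author's own statement) =====
-- stated objective: alternative
-- what changed: A keeps a fixed L-length newest-first register and shifts every slot each step; B appends each new symbol to a single growing history list initialised from sourceSeq[:L] and reads the feedback taps by index arithmetic (W[L-1+i-j]), returning W[L:].
import Mathlib
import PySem

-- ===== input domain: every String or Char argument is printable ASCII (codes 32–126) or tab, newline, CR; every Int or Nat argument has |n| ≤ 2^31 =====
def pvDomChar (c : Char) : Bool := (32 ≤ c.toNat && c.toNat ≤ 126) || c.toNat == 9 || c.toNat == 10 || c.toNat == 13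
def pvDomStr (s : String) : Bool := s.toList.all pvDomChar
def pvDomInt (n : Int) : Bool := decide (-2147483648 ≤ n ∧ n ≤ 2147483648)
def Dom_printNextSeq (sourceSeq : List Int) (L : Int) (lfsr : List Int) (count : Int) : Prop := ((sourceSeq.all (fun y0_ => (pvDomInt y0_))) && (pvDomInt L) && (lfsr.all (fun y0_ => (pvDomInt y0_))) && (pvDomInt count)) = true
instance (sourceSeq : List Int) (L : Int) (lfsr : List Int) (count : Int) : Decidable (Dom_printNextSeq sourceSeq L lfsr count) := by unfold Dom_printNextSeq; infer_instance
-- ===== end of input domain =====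

-- B replaces A's per-step register shift by appending each new symbol to a growing
-- history list and reading the feedback taps by index arithmetic (objective: alternative).

-- ===== PORT A =====
-- gf_mult (module helper both versions call): 'x << 1' is 'x <<< 1', 'y >> 1' is 'y >>> 1',
-- '&' / '^' are PySem.Int.band / bxor (Python-exact on negatives).
def gfMultGo (x y res : Int) : Int :=
  if 0 < y then
    let res' := if PySem.Int.band y 1 ≠ 0 then PySem.Int.bxor res x else res
    let x' := x <<< (1 : Nat)
    let x'' := if PySem.Int.band x' 256 ≠ 0 then PySem.Int.bxor x' 285 else x'
    gfMultGo x'' (y >>> (1 : Nat)) res'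
  else res
termination_by y.toNat
decreasing_by
  have : y >>> (1 : Nat) = y / 2 ^ 1 := Int.shiftRight_eq_div_pow y 1
  simp only [this]; omega

def gfMult (x y : Int) : Int := gfMultGo x y 0

-- body of A's outer 'for i in range(count)' loop over the state (registr, gamma);
-- registr[i] = v / registr[i] (always in range under Pre_) are List.set / PySem.List.pyGetD.
def pnsStepA (L : Int) (lfsr : List Int) (st : List Int × List Int) (_i : Int) : List Int × List Int :=
  let nextS := (PySem.List.pyRange 0 L 1).foldl
    (fun acc j => PySem.Int.bxor acc (gfMult (PySem.List.pyGetD lfsr (j + 1) 0) (PySem.List.pyGetD st.1 j 0))) 0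
  let reg := (PySem.List.pyRange (L - 1) 0 (-1)).foldl
    (fun r j => r.set j.toNat (PySem.List.pyGetD r (j - 1) 0)) st.1
  let reg := reg.set 0 nextS
  (reg, st.2 ++ [nextS])

def printNextSeq (sourceSeq : List Int) (L : Int) (lfsr : List Int) (count : Int) : List Int :=
  let registr : List Int := List.replicate L.toNat 0
  let gamma : List Int := []
  let registr := (PySem.List.pyRange 0 L 1).foldl
    (fun reg i => reg.set i.toNat (PySem.List.pyGetD sourceSeq (L - i - 1) 0)) registr
  let st := (PySem.List.pyRange 0 count 1).foldl (pnsStepA L lfsr) (registr, gamma)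
  st.2

-- ===== PORT B =====
-- body of B's 'for i in range(count)' loop over the growing history W
def pnsStepB (L : Int) (lfsr : List Int) (W : List Int) (i : Int) : List Int :=
  let s := (PySem.List.pyRange 0 L 1).foldl
    (fun acc j => PySem.Int.bxor acc (gfMult (PySem.List.pyGetD lfsr (j + 1) 0) (PySem.List.pyGetD W (L - 1 + i - j) 0))) 0
  W ++ [s]

def printNextSeq_alt (sourceSeq : List Int) (L : Int) (lfsr : List Int) (count : Int) : List Int :=
  let W := (PySem.List.pyRange 0 L 1).map (fun k => PySem.List.pyGetD sourceSeq k 0)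
  let W := (PySem.List.pyRange 0 count 1).foldl (pnsStepB L lfsr) W
  PySem.List.slice W (some L) none

-- ===== PRECONDITION & SPEC =====
-- Pre_ = exactly where the Python A returns (no exception): the register fits in sourceSeq,
-- and when any step runs the register is nonempty (else registr[0] raises IndexError) and
-- lfsr covers the taps lfsr[1..L].
def Pre_printNextSeq (sourceSeq : List Int) (L : Int) (lfsr : List Int) (count : Int) : Prop :=
  (0 ≤ L → L ≤ (sourceSeq.length : Int)) ∧ (0 < count → 1 ≤ L ∧ L + 1 ≤ (lfsr.length : Int))
instance (sourceSeq : List Int) (L : Int) (lfsr : List Int) (count : Int) : Decidable (Pre_printNextSeq sourceSeq L lfsr count) := by unfold Pre_printNextSeq; infer_instance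
def pvWitness_printNextSeq : List Int × Int × List Int × Int := ([7, 2], 2, [1, 3, 1], 3)

def Spec_printNextSeq (sourceSeq : List Int) (L : Int) (lfsr : List Int) (count : Int) (out : List Int) : Prop := out = printNextSeq_alt sourceSeq L lfsr count
instance (sourceSeq : List Int) (L : Int) (lfsr : List Int) (count : Int) (out : List Int) : Decidable (Spec_printNextSeq sourceSeq L lfsr count out) := by unfold Spec_printNextSeq; infer_instance

-- ===== CLAIM (what is proved, stated in full; the proofs are below) =====
def Claim_equal_printNextSeq : Prop := ∀ (sourceSeq : List Int) (L : Int) (lfsr : List Int) (count : Int), Dom_printNextSeq sourceSeq L lfsr count → Pre_printNextSeq sourceSeq L lfsr count → Spec_printNextSeq sourceSeq L lfsr count (printNextSeq sourceSeq L lfsr count)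

-- ===== LEMMAS AND PROOFS =====

theorem pns_getD_set (l : List Int) (n : Nat) (a : Int) (p : Nat) :
    (l.set n a).getD p 0 = if n = p ∧ n < l.length then a else l.getD p 0 := by
  by_cases h1 : n = p
  · subst h1
    by_cases h2 : n < l.length
    · simp [List.getD_eq_getElem?_getD, h2]
    · simp [List.getD_eq_getElem?_getD, h2]
  · simp [List.getD_eq_getElem?_getD, h1]

-- A's backward shift loop 'for j in range(k, 0, -1): registr[j] = registr[j-1]', elementwise.
theorem pns_shift_spec (k : Nat) : ∀ (reg : List Int), k < reg.length →
    ((PySem.List.pyRange (k : Int) 0 (-1)).foldl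
        (fun r j => r.set j.toNat (PySem.List.pyGetD r (j - 1) 0)) reg).length = reg.length
    ∧ ∀ m : Nat, ((PySem.List.pyRange (k : Int) 0 (-1)).foldl
        (fun r j => r.set j.toNat (PySem.List.pyGetD r (j - 1) 0)) reg).getD m 0
      = if 1 ≤ m ∧ m ≤ k then reg.getD (m - 1) 0 else reg.getD m 0 := by
  induction k with
  | zero =>
    intro reg _
    rw [PySem.List.pyRange_neg_one_eq_nil (by omega)]
    refine ⟨rfl, fun m => ?_⟩
    rw [List.foldl_nil, if_neg (by omega)]
  | succ k ih =>
    intro reg h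
    rw [PySem.List.pyRange_neg_one_cons (by exact_mod_cast Nat.succ_pos k)]
    have hcast : ((k + 1 : Nat) : Int).toNat = k + 1 := by omega
    have hcast2 : ((k + 1 : Nat) : Int) - 1 = (k : Int) := by omega
    simp only [List.foldl_cons, hcast, hcast2, PySem.List.pyGetD_natCast]
    obtain ⟨ihlen, ihget⟩ := ih (reg.set (k + 1) (reg.getD k 0)) (by simpa using by omega)
    refine ⟨by simpa using ihlen, fun m => ?_⟩
    rw [ihget m]
    by_cases hm1 : 1 ≤ m ∧ m ≤ k
    · rw [if_pos hm1, if_pos (by omega : 1 ≤ m ∧ m ≤ k + 1), pns_getD_set, if_neg (by omega)]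
    · by_cases hm2 : m = k + 1
      · rw [if_neg (by omega), pns_getD_set, if_pos ⟨hm2.symm, by omega⟩, if_pos (by omega)]
        congr 1
        omega
      · rw [if_neg hm1, if_neg (by omega), pns_getD_set, if_neg (by omega)]

-- A's initialisation loop 'for i in range(m): registr[i] = sourceSeq[L-i-1]', elementwise.
theorem pns_init_spec (src : List Int) (Ln : Nat) : ∀ m : Nat, m ≤ Ln →
    ((PySem.List.pyRange 0 (m : Int) 1).foldl
        (fun reg i => reg.set i.toNat (PySem.List.pyGetD src ((Ln : Int) - i - 1) 0))
        (List.replicate Ln 0)).length = Ln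
    ∧ ∀ p : Nat, ((PySem.List.pyRange 0 (m : Int) 1).foldl
        (fun reg i => reg.set i.toNat (PySem.List.pyGetD src ((Ln : Int) - i - 1) 0))
        (List.replicate Ln 0)).getD p 0
      = if p < m then PySem.List.pyGetD src ((Ln : Int) - (p : Int) - 1) 0 else 0 := by
  intro m
  induction m with
  | zero =>
    intro _
    rw [PySem.List.pyRange_one_eq_nil (by omega)]
    refine ⟨by simp, fun p => ?_⟩
    rw [List.foldl_nil, if_neg (by omega)]
    simp only [List.getD_eq_getElem?_getD, List.getElem?_replicate]
    split <;> rfl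
  | succ m ih =>
    intro hm
    obtain ⟨ihlen, ihget⟩ := ih (by omega)
    have hc1 : ((m + 1 : Nat) : Int) = (m : Int) + 1 := by push_cast; ring
    rw [hc1, PySem.List.pyRange_one_succ_right (by omega), List.foldl_append]
    simp only [List.foldl_cons, List.foldl_nil]
    have hcast : ((m : Int)).toNat = m := by omega
    rw [hcast]
    refine ⟨by simpa using ihlen, fun p => ?_⟩
    rw [pns_getD_set, ihlen]
    by_cases h1 : m = p
    · subst h1
      rw [if_pos ⟨rfl, by omega⟩, if_pos (by omega)]
    · rw [if_neg (by simp [h1]), ihget p]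
      by_cases h2 : p < m
      · rw [if_pos h2, if_pos (by omega)]
      · rw [if_neg h2, if_neg (by omega)]

-- the core step: one turn of A's register update tracks one append to B's history
theorem pns_step (L : Int) (lfsr : List Int) (Ln : Nat) (hL : L = (Ln : Int)) (h1 : 1 ≤ Ln)
    (i : Nat) (W : List Int) (hW : W.length = Ln + i) :
    pnsStepA L lfsr ((W.drop i).reverse, W.drop Ln) (i : Int)
      = (((pnsStepB L lfsr W (i : Int)).drop (i + 1)).reverse, (pnsStepB L lfsr W (i : Int)).drop Ln) := by
  have hRlen : (W.drop i).reverse.length = Ln := by simp; omega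
  -- the two feedback sums are equal
  have hsum : (PySem.List.pyRange 0 L 1).foldl
      (fun acc j => PySem.Int.bxor acc (gfMult (PySem.List.pyGetD lfsr (j + 1) 0) (PySem.List.pyGetD (W.drop i).reverse j 0))) 0
    = (PySem.List.pyRange 0 L 1).foldl
      (fun acc j => PySem.Int.bxor acc (gfMult (PySem.List.pyGetD lfsr (j + 1) 0) (PySem.List.pyGetD W (L - 1 + (i : Int) - j) 0))) 0 := by
    refine PySem.List.foldl_congr_mem _ _ _ _ ?_
    intro acc j hj
    rw [PySem.List.mem_pyRange_one] at hj
    obtain ⟨hj0, hjL'⟩ := hj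
    lift j to ℕ using hj0 with jn
    have hjnL : jn < Ln := by omega
    have e1 : PySem.List.pyGetD (W.drop i).reverse (jn : Int) 0 = W[i + (Ln - 1 - jn)]'(by omega) := by
      rw [PySem.List.pyGetD_natCast, List.getD_eq_getElem _ _ (by rw [hRlen]; exact hjnL),
        List.getElem_reverse, List.getElem_drop]
      congr 1
      simp only [List.length_drop]
      omega
    have e2 : PySem.List.pyGetD W (L - 1 + (i : Int) - (jn : Int)) 0 = W[i + (Ln - 1 - jn)]'(by omega) := by
      have hix : L - 1 + (i : Int) - (jn : Int) = ((i + (Ln - 1 - jn) : Nat) : Int) := by omega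
      rw [hix, PySem.List.pyGetD_natCast, List.getD_eq_getElem _ _ (by omega)]
    rw [e1, e2]
  -- unfold both steps
  simp only [pnsStepA, pnsStepB]
  rw [hsum]
  set s := (PySem.List.pyRange 0 L 1).foldl
      (fun acc j => PySem.Int.bxor acc (gfMult (PySem.List.pyGetD lfsr (j + 1) 0) (PySem.List.pyGetD W (L - 1 + (i : Int) - j) 0))) 0 with hs
  have hdrop1 : (W ++ [s]).drop (i + 1) = W.drop (i + 1) ++ [s] :=
    List.drop_append_of_le_length (by omega)
  have hdropL : (W ++ [s]).drop Ln = W.drop Ln ++ [s] :=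
    List.drop_append_of_le_length (by omega)
  refine Prod.ext ?_ ?_
  · -- register component
    show (((PySem.List.pyRange (L - 1) 0 (-1)).foldl
        (fun r j => r.set j.toNat (PySem.List.pyGetD r (j - 1) 0)) (W.drop i).reverse).set 0 s)
      = ((W ++ [s]).drop (i + 1)).reverse
    have hrange : PySem.List.pyRange (L - 1) 0 (-1) = PySem.List.pyRange ((Ln - 1 : Nat) : Int) 0 (-1) := by
      congr 1
      omega
    rw [hrange]
    obtain ⟨slen, sget⟩ := pns_shift_spec (Ln - 1) (W.drop i).reverse (by omega)
    rw [hdrop1]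
    apply List.ext_getElem
    · simp at slen ⊢
      omega
    · intro p hp hp2
      have hpLn : p < Ln := by simp [slen, hRlen] at hp; simpa [hRlen] using hp
      by_cases hp0 : p = 0
      · subst hp0
        rw [List.getElem_set_self hp, List.getElem_reverse]
        rw [List.getElem_append_right (by
          simp only [List.length_append, List.length_drop, List.length_cons, List.length_nil]
          omega)]
        simp
      · rw [List.getElem_set_ne (by omega)]
        have : ((PySem.List.pyRange ((Ln - 1 : Nat) : Int) 0 (-1)).foldl
            (fun r j => r.set j.toNat (PySem.List.pyGetD r (j - 1) 0)) (W.drop i).reverse)[p]'(by omega)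
          = ((PySem.List.pyRange ((Ln - 1 : Nat) : Int) 0 (-1)).foldl
            (fun r j => r.set j.toNat (PySem.List.pyGetD r (j - 1) 0)) (W.drop i).reverse).getD p 0 := by
          rw [List.getD_eq_getElem _ _ (by omega)]
        rw [this, sget p, if_pos ⟨by omega, by omega⟩]
        rw [List.getD_eq_getElem _ _ (by rw [hRlen]; omega)]
        rw [List.getElem_reverse, List.getElem_reverse, List.getElem_drop]
        rw [List.getElem_append_left (by simp; omega), List.getElem_drop]
        congr 1
        simp only [List.length_drop, List.length_append, List.length_cons, List.length_nil]
        omega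
  · -- gamma component
    show W.drop Ln ++ [s] = (W ++ [s]).drop Ln
    rw [hdropL]

-- the main loop: A's (register, gamma) state tracks B's growing history W
theorem pns_loop (L : Int) (lfsr : List Int) (Ln : Nat) (hL : L = (Ln : Int)) (h1 : 1 ≤ Ln) :
    ∀ (n i : Nat) (W : List Int), W.length = Ln + i →
    (PySem.List.pyRange (i : Int) ((i : Int) + (n : Int)) 1).foldl (pnsStepA L lfsr)
        ((W.drop i).reverse, W.drop Ln)
      = ((((PySem.List.pyRange (i : Int) ((i : Int) + (n : Int)) 1).foldl (pnsStepB L lfsr) W).drop (i + n)).reverse,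
         ((PySem.List.pyRange (i : Int) ((i : Int) + (n : Int)) 1).foldl (pnsStepB L lfsr) W).drop Ln) := by
  intro n
  induction n with
  | zero =>
    intro i W _
    rw [show ((i : Int) + ((0 : Nat) : Int)) = (i : Int) by push_cast; ring,
      PySem.List.pyRange_one_eq_nil (by omega)]
    simp
  | succ n ih =>
    intro i W hW
    have hcons : PySem.List.pyRange (i : Int) ((i : Int) + ((n + 1 : Nat) : Int)) 1
        = (i : Int) :: PySem.List.pyRange ((i : Int) + 1) ((i : Int) + ((n + 1 : Nat) : Int)) 1 :=
      PySem.List.pyRange_one_cons (by push_cast; omega)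
    rw [hcons]
    simp only [List.foldl_cons]
    rw [pns_step L lfsr Ln hL h1 i W hW]
    have hrange : PySem.List.pyRange ((i : Int) + 1) ((i : Int) + ((n + 1 : Nat) : Int)) 1
        = PySem.List.pyRange (((i + 1 : Nat) : Int)) (((i + 1 : Nat) : Int) + (n : Int)) 1 := by
      congr 1
      all_goals push_cast; ring
    rw [hrange]
    have hlen' : (pnsStepB L lfsr W (i : Int)).length = Ln + (i + 1) := by
      simp only [pnsStepB]
      simp [hW]
      omega
    rw [ih (i + 1) (pnsStepB L lfsr W (i : Int)) hlen']
    have : i + 1 + n = i + (n + 1) := by omega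
    rw [this]

-- B's initial window [sourceSeq[k] for k in range(L)] is take(L)
theorem pns_winit (src : List Int) (L : Int) (hL0 : 0 ≤ L) (hlen : L ≤ (src.length : Int)) :
    (PySem.List.pyRange 0 L 1).map (fun k => PySem.List.pyGetD src k 0) = src.take L.toNat := by
  apply List.ext_getElem
  · simp only [List.length_map, PySem.List.length_pyRange_one, List.length_take]
    omega
  · intro p hp hp2
    simp only [List.length_map, PySem.List.length_pyRange_one] at hp
    rw [List.getElem_map, PySem.List.getElem_pyRange_one, zero_add]
    rw [show ((p : Int)) = ((p : Nat) : Int) from rfl, PySem.List.pyGetD_natCast]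
    rw [List.getD_eq_getElem _ _ (by omega), List.getElem_take]

-- ===== VERDICT (by name: the statement is the Claim_ definition above) =====
theorem printNextSeq_spec : Claim_equal_printNextSeq := by
  intro src L lfsr count _hdom hpre
  obtain ⟨hlen, hrun⟩ := hpre
  show printNextSeq src L lfsr count = printNextSeq_alt src L lfsr count
  dsimp only [printNextSeq, printNextSeq_alt]
  by_cases hc : count ≤ 0
  · rw [show PySem.List.pyRange 0 count 1 = [] from PySem.List.pyRange_one_eq_nil (by omega)]
    simp only [List.foldl_nil]
    by_cases hL0 : 0 ≤ L
    · rw [pns_winit src L hL0 (hlen hL0), PySem.List.slice_from _ hL0]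
      rw [List.drop_take]
      simp
    · rw [show PySem.List.pyRange 0 L 1 = [] from PySem.List.pyRange_one_eq_nil (by omega)]
      simp [PySem.List.slice_some_none]
  · -- count > 0 : the register is nonempty and the taps are covered
    obtain ⟨hL1, _hlf⟩ := hrun (by omega)
    have hL0 : 0 ≤ L := by omega
    have hLlen : L ≤ (src.length : Int) := hlen hL0
    rw [pns_winit src L hL0 hLlen]
    set Ln := L.toNat with hLn
    have hL : L = (Ln : Int) := by omega
    have hW0 : (src.take L.toNat).length = Ln + 0 := by simp; omega
    have hinit : (PySem.List.pyRange 0 L 1).foldl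
        (fun reg i => reg.set i.toNat (PySem.List.pyGetD src (L - i - 1) 0)) (List.replicate L.toNat 0)
      = ((src.take L.toNat).drop 0).reverse := by
      have hr : PySem.List.pyRange 0 L 1 = PySem.List.pyRange 0 ((Ln : Nat) : Int) 1 := by rw [hL]
      rw [hr]
      have hb : (fun (reg : List Int) (i : Int) => reg.set i.toNat (PySem.List.pyGetD src (L - i - 1) 0))
          = fun reg i => reg.set i.toNat (PySem.List.pyGetD src ((Ln : Int) - i - 1) 0) := by
        rw [hL]
      rw [show (L.toNat) = Ln from rfl, hb]
      obtain ⟨ilen, iget⟩ := pns_init_spec src Ln Ln (le_refl Ln)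
      apply List.ext_getElem
      · simp [ilen]
        omega
      · intro p hp hp2
        rw [ilen] at hp
        have e1 : ((PySem.List.pyRange 0 ((Ln : Nat) : Int) 1).foldl
            (fun reg i => reg.set i.toNat (PySem.List.pyGetD src ((Ln : Int) - i - 1) 0))
            (List.replicate Ln 0))[p]'(by omega)
          = PySem.List.pyGetD src ((Ln : Int) - (p : Int) - 1) 0 := by
          rw [← List.getD_eq_getElem _ _ (by omega), iget p, if_pos hp]
        rw [e1]
        have hidx : (Ln : Int) - (p : Int) - 1 = ((Ln - 1 - p : Nat) : Int) := by omega
        rw [hidx, PySem.List.pyGetD_natCast, List.getD_eq_getElem _ _ (by omega)]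
        rw [List.getElem_reverse, List.getElem_drop, List.getElem_take]
        congr 1
        simp
        omega
    rw [hinit]
    have hgam : ([] : List Int) = (src.take L.toNat).drop Ln := by
      rw [List.drop_take]
      simp
      omega
    rw [hgam]
    have hrng : PySem.List.pyRange ((0 : Nat) : Int) (((0 : Nat) : Int) + ((count.toNat : Nat) : Int)) 1
        = PySem.List.pyRange 0 count 1 := by
      have h1 : ((0 : Nat) : Int) + ((count.toNat : Nat) : Int) = count := by omega
      rw [h1, Nat.cast_zero]
    rw [← hrng]
    rw [pns_loop L lfsr Ln hL (by omega) count.toNat 0 (src.take L.toNat) hW0]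
    rw [PySem.List.slice_from _ hL0]
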